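-- pv_equiv track=rewrite | github.com/leonel11/Genetic_Algo_Traveller | GeneticAlgo.py | IsHromosomeContainCycle
-- ===== SOURCE A (Python) =====
-- def IsHromosomeContainCycle(hromosome):
--     i = 0
--     while (i < len(hromosome)-1) and (hromosome[i] != 0):
--         j = i+1
--         while (j < len(hromosome)) and (hromosome[j] != 0):
--             if hromosome[i] == hromosome[j]:
--                 return True
--             else:
--                 j += 1
--         i += 1
--     return False
-- ===== SOURCE B (Python) =====
-- def IsHromosomeContainCycle(hromosome):
--     seen = set()
--     for gene in hromosome:
--         if gene == 0:
--             break
--         if gene in seen: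
--             return True
--         seen.add(gene)
--     return False
-- ===== Notes on version B (the rewrite author's own statement) =====
-- stated objective: faster
-- what changed: Replaces A's nested index-based pairwise scan with a single pass over the chromosome that stops at the first 0 and checks each gene against a hash set of genes seen so far.
import Mathlib
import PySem

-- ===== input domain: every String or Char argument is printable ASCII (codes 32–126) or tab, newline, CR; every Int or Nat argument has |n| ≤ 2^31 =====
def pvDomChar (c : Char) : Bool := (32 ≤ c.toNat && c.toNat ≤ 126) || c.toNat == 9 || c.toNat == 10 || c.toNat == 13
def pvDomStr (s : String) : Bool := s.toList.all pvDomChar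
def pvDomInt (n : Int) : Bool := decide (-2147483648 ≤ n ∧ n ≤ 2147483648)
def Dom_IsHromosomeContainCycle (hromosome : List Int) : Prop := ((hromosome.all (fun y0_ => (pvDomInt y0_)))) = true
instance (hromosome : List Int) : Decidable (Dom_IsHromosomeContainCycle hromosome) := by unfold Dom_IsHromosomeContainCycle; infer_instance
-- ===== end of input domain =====

-- B replaces A's O(n^2) nested pairwise scan with a single pass that stops at the first 0 and checks each gene against a set of genes seen so far.

-- ===== PORT A =====
-- inner while loop of A: j scans forward from i+1 while in range and nonzero, comparing to hromosome[i]
def pvInnerA (h : List Int) (vi : Int) (j : Nat) : Bool :=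
  if _hj : j < h.length then
    if h.getD j 0 ≠ 0 then
      if vi = h.getD j 0 then true else pvInnerA h vi (j + 1)
    else false
  else false
termination_by h.length - j


-- outer while loop of A: runs while i < len(h)-1 and h[i] != 0
def pvOuterA (h : List Int) (i : Nat) : Bool :=
  if _hi : i + 1 < h.length then
    if h.getD i 0 ≠ 0 then
      if pvInnerA h (h.getD i 0) (i + 1) then true else pvOuterA h (i + 1)
    else false
  else false
termination_by h.length - i

def IsHromosomeContainCycle (hromosome : List Int) : Bool := pvOuterA hromosome 0

-- ===== PORT B =====
-- for gene in hromosome: break on 0, return True if seen, else add to the set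
def pvGoB (seen : PySem.Set Int) : List Int → Bool
  | [] => false
  | g :: rest =>
    if g = 0 then false
    else if PySem.Set.contains seen g then true
    else pvGoB (PySem.Set.add seen g) rest

def IsHromosomeContainCycle_alt (hromosome : List Int) : Bool :=
  pvGoB PySem.Set.empty hromosome

-- ===== PRECONDITION & SPEC =====
def Spec_IsHromosomeContainCycle (hromosome : List Int) (out : Bool) : Prop := out = IsHromosomeContainCycle_alt hromosome
instance (hromosome : List Int) (out : Bool) : Decidable (Spec_IsHromosomeContainCycle hromosome out) := by unfold Spec_IsHromosomeContainCycle; infer_instance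

-- ===== CLAIM (what is proved, stated in full; the proofs are below) =====
def Claim_equal_IsHromosomeContainCycle : Prop := ∀ (hromosome : List Int), Dom_IsHromosomeContainCycle hromosome → Spec_IsHromosomeContainCycle hromosome (IsHromosomeContainCycle hromosome)

-- ===== LEMMAS AND PROOFS =====

-- common specification helpers: the prefix before the first 0, and "has a duplicate"
def pvPrefix (h : List Int) : List Int := h.takeWhile (fun x => x != 0)

def pvDupB : List Int → Bool
  | [] => false
  | x :: xs => xs.contains x || pvDupB xs

theorem pvInnerA_eq (h : List Int) (vi : Int) (j : Nat) :
    pvInnerA h vi j = (pvPrefix (h.drop j)).contains vi := by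
  fun_induction pvInnerA h vi j with
  | case1 j hj hnz heq =>
    rw [List.getD_eq_getElem h 0 hj] at hnz heq
    have key : (h.drop j).takeWhile (fun x => x != 0)
        = if (h[j] != 0) = true then h[j] :: (h.drop (j+1)).takeWhile (fun x => x != 0) else [] := by
      rw [List.drop_eq_getElem_cons hj, List.takeWhile_cons]
    rw [pvPrefix, key, if_pos (by simpa using hnz)]
    simp [heq]
  | case2 j hj hnz hne ih =>
    rw [List.getD_eq_getElem h 0 hj] at hnz hne
    have key : (h.drop j).takeWhile (fun x => x != 0)
        = if (h[j] != 0) = true then h[j] :: (h.drop (j+1)).takeWhile (fun x => x != 0) else [] := by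
      rw [List.drop_eq_getElem_cons hj, List.takeWhile_cons]
    rw [pvPrefix, key, if_pos (by simpa using hnz)]
    simp only [pvPrefix] at ih
    rw [ih, List.contains_cons]
    simp [hne]
  | case3 j hj hz =>
    rw [List.getD_eq_getElem h 0 hj] at hz
    simp only [Decidable.not_not] at hz
    have key : (h.drop j).takeWhile (fun x => x != 0)
        = if (h[j] != 0) = true then h[j] :: (h.drop (j+1)).takeWhile (fun x => x != 0) else [] := by
      rw [List.drop_eq_getElem_cons hj, List.takeWhile_cons]
    rw [pvPrefix, key, if_neg (by simp [hz])]
    simp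
  | case4 j hj =>
    have : h.drop j = [] := List.drop_eq_nil_of_le (by omega)
    simp [pvPrefix, this]


theorem pvOuterA_eq (h : List Int) (i : Nat) :
    pvOuterA h i = pvDupB (pvPrefix (h.drop i)) := by
  fun_induction pvOuterA h i with
  | case1 i hi hnz hInner =>
    have hlt : i < h.length := by omega
    rw [List.getD_eq_getElem h 0 hlt] at hnz hInner
    have key : (h.drop i).takeWhile (fun x => x != 0)
        = if (h[i] != 0) = true then h[i] :: (h.drop (i+1)).takeWhile (fun x => x != 0) else [] := by
      rw [List.drop_eq_getElem_cons hlt, List.takeWhile_cons]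
    rw [pvInnerA_eq] at hInner
    rw [pvPrefix, key, if_pos (by simpa using hnz)]
    have hmem : h[i] ∈ List.takeWhile (fun x => x != 0) (List.drop (i+1) h) := by
      simpa using hInner
    simp [pvDupB, hmem]
  | case2 i hi hnz hInner ih =>
    have hlt : i < h.length := by omega
    rw [List.getD_eq_getElem h 0 hlt] at hnz hInner
    have key : (h.drop i).takeWhile (fun x => x != 0)
        = if (h[i] != 0) = true then h[i] :: (h.drop (i+1)).takeWhile (fun x => x != 0) else [] := by
      rw [List.drop_eq_getElem_cons hlt, List.takeWhile_cons]
    rw [pvInnerA_eq] at hInner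
    rw [pvPrefix, key, if_pos (by simpa using hnz)]
    have hmem : h[i] ∉ List.takeWhile (fun x => x != 0) (List.drop (i+1) h) := by
      simpa using hInner
    rw [ih]
    simp [pvDupB, hmem, pvPrefix]
  | case3 i hi hz =>
    have hlt : i < h.length := by omega
    rw [List.getD_eq_getElem h 0 hlt] at hz
    simp only [Decidable.not_not] at hz
    have key : (h.drop i).takeWhile (fun x => x != 0)
        = if (h[i] != 0) = true then h[i] :: (h.drop (i+1)).takeWhile (fun x => x != 0) else [] := by
      rw [List.drop_eq_getElem_cons hlt, List.takeWhile_cons]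
    rw [pvPrefix, key, if_neg (by simp [hz])]
    simp [pvDupB]
  | case4 i hi =>
    rcases Nat.lt_or_ge i h.length with hlt | hge
    · have key : (h.drop i).takeWhile (fun x => x != 0)
          = if (h[i] != 0) = true then h[i] :: (h.drop (i+1)).takeWhile (fun x => x != 0) else [] := by
        rw [List.drop_eq_getElem_cons hlt, List.takeWhile_cons]
      have hnil : h.drop (i+1) = [] := List.drop_eq_nil_of_le (by omega)
      rw [pvPrefix, key, hnil]
      split_ifs <;> simp [pvDupB]
    · rw [pvPrefix, List.drop_eq_nil_of_le hge]
      simp [pvDupB]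

theorem any_contains_add (l : List Int) (s : PySem.Set Int) (g : Int) :
    (l.any fun y => (PySem.Set.add s g).contains y)
      = ((l.any fun y => PySem.Set.contains s y) || l.contains g) := by
  rw [Bool.eq_iff_iff]
  simp only [Bool.or_eq_true, List.any_eq_true, PySem.Set.contains, List.contains_iff_mem,
    PySem.Set.mem_add]
  constructor
  · rintro ⟨y, hy, (h | h)⟩
    · exact Or.inl ⟨y, hy, h⟩
    · exact Or.inr (h ▸ hy)
  · rintro (⟨y, hy, h⟩ | h)
    · exact ⟨y, hy, Or.inl h⟩
    · exact ⟨g, h, Or.inr rfl⟩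

theorem pvGoB_eq (xs : List Int) (seen : PySem.Set Int) :
    pvGoB seen xs = ((pvPrefix xs).any (fun y => PySem.Set.contains seen y) || pvDupB (pvPrefix xs)) := by
  induction xs generalizing seen with
  | nil => simp [pvGoB, pvPrefix, pvDupB]
  | cons g rest ih =>
    by_cases hg : g = 0
    · simp [pvGoB, hg, pvPrefix, pvDupB]
    · by_cases hs : PySem.Set.contains seen g = true
      · have hmem : g ∈ seen := by simpa [List.contains_iff_mem] using hs
        have hpre : g ∈ pvPrefix (g :: rest) := by
          simp [pvPrefix, hg]
        simp only [pvGoB, if_neg hg, hs, if_true]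
        rw [Bool.eq_iff_iff]
        simp only [Bool.or_eq_true, List.any_eq_true, PySem.Set.contains, List.contains_iff_mem]
        exact ⟨fun _ => Or.inl ⟨g, hpre, hmem⟩, fun _ => trivial⟩
      · simp only [pvGoB, if_neg hg, hs, Bool.false_eq_true, if_false]
        rw [ih]
        simp only [pvPrefix, List.takeWhile_cons, bne_iff_ne, ne_eq, hg, not_false_eq_true,
          if_true, List.any_cons, pvDupB, any_contains_add]
        rw [Bool.eq_iff_iff]
        simp only [Bool.or_eq_true]
        have hsg : ¬ (PySem.Set.contains seen g = true) := hs
        tauto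

-- ===== VERDICT (by name: the statement is the Claim_ definition above) =====
theorem IsHromosomeContainCycle_spec : Claim_equal_IsHromosomeContainCycle := by
  intro h _
  show IsHromosomeContainCycle h = IsHromosomeContainCycle_alt h
  rw [IsHromosomeContainCycle, IsHromosomeContainCycle_alt, pvOuterA_eq, pvGoB_eq]
  simp [List.drop_zero, PySem.Set.contains]
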